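-- pv_equiv track=rewrite | github.com/anisha-singhal-1/Mini-Projects | MutationDetection.py | SeqMatch
-- ===== SOURCE A (Python) =====
-- def SeqMatch(seq1, seq2):
--     bestMatch = 0
--     bestSeqList = []
--
--     if len(seq1) > len(seq2):
--         longSeq = seq1
--         shortSeq = seq2
--     else:
--         shortSeq = seq1
--         longSeq = seq2
--
--     for i in range(len(longSeq)-len(shortSeq) + 1):
--         currSeq = ""
--         currMatch = 0
--         for j in range(len(shortSeq)):
--             lBase = longSeq[i+j]
--             sBase = shortSeq[j]
--             if sBase == lBase:
--                 currMatch += 1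
--                 currSeq += lBase
--             else:
--                 currSeq += '*'
--
--         if currMatch > bestMatch:
--             bestMatch = currMatch
--             bestSeqList = []
--             bestSeqList.append(currSeq)
--         elif currMatch == bestMatch:
--             bestSeqList.append(currSeq)
--
--     return (bestMatch, bestSeqList)
-- ===== SOURCE B (Python) =====
-- def SeqMatch(seq1, seq2):
--     if len(seq1) > len(seq2):
--         longSeq, shortSeq = seq1, seq2
--     else:
--         longSeq, shortSeq = seq2, seq1
--     pairs = []
--     for i in range(len(longSeq) - len(shortSeq) + 1):
--         zs = list(zip(longSeq[i:i + len(shortSeq)], shortSeq))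
--         cnt = sum(1 for l, s in zs if l == s)
--         masked = ''.join(l if l == s else '*' for l, s in zs)
--         pairs.append((cnt, masked))
--     best = max(c for c, _ in pairs)
--     return (best, [m for c, m in pairs if c == best])
-- ===== Notes on version B (the rewrite author's own statement) =====
-- stated objective: alternative
-- what changed: Replaces A's online running-best/reset accumulator with a build-all-then-select structure: one pass materialises (count, masked) pairs via zip over slices, then best = max of counts and the result list is a filter of the pairs.
import Mathlib
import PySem

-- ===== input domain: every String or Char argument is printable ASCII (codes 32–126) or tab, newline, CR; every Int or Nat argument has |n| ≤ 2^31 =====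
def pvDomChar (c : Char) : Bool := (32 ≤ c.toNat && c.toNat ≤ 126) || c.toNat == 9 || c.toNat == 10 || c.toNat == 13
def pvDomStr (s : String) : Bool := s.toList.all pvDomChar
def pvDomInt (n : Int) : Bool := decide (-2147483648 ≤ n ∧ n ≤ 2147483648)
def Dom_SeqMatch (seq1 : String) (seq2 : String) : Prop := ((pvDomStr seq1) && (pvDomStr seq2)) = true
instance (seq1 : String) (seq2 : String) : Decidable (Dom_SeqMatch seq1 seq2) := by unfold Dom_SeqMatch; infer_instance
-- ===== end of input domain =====

-- B replaces A's online running-best/reset accumulator with build-all-(count, masked)-pairs, then max + filter (alternative decomposition, same cost).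


-- ===== PORT A =====
-- literal port of A; longSeq[i+j] and shortSeq[j] are always in range here, so getD is exact
def SeqMatch (seq1 : String) (seq2 : String) : Int × List String :=
  let p := if seq1.toList.length > seq2.toList.length
           then (seq1.toList, seq2.toList) else (seq2.toList, seq1.toList)
  let longS := p.1
  let shortS := p.2
  (List.range (longS.length - shortS.length + 1)).foldl
    (fun st i =>
      let inner := (List.range shortS.length).foldl
        (fun (acc : List Char × Int) j =>
          let lB := longS.getD (i + j) ' '
          let sB := shortS.getD j ' '
          if sB == lB then (acc.1 ++ [lB], acc.2 + 1) else (acc.1 ++ ['*'], acc.2))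
        ([], 0)
      let currSeq := String.ofList inner.1
      let currMatch := inner.2
      if currMatch > st.1 then (currMatch, [currSeq])
      else if currMatch == st.1 then (st.1, st.2 ++ [currSeq])
      else st)
    (0, [])

-- ===== PORT B =====
-- port of Source B: build all (count, masked) pairs, then best = max of counts, result = filter
def SeqMatch_alt (seq1 : String) (seq2 : String) : Int × List String :=
  let p := if seq1.toList.length > seq2.toList.length
           then (seq1.toList, seq2.toList) else (seq2.toList, seq1.toList)
  let longS := p.1
  let shortS := p.2
  let pairs := (List.range (longS.length - shortS.length + 1)).map (fun i =>
    let zs := ((longS.drop i).take shortS.length).zip shortS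
    (((zs.filter (fun q => q.1 == q.2)).length : Int),
     String.ofList (zs.map (fun q => if q.1 == q.2 then q.1 else '*'))))
  -- python 'max(...)': pairs is never empty (the range always has ≥ 1 element); [] branch is a totality guard
  let best : Int := match pairs.map Prod.fst with
    | [] => 0
    | x :: t => t.foldl max x
  (best, (pairs.filter (fun q => q.1 == best)).map Prod.snd)

-- ===== PRECONDITION & SPEC =====
def Spec_SeqMatch (seq1 : String) (seq2 : String) (out : Int × List String) : Prop := out = SeqMatch_alt seq1 seq2
instance (seq1 : String) (seq2 : String) (out : Int × List String) : Decidable (Spec_SeqMatch seq1 seq2 out) := by unfold Spec_SeqMatch; infer_instance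

-- ===== CLAIM (what is proved, stated in full; the proofs are below) =====
def Claim_equal_SeqMatch : Prop := ∀ (seq1 : String) (seq2 : String), Dom_SeqMatch seq1 seq2 → Spec_SeqMatch seq1 seq2 (SeqMatch seq1 seq2)

-- ===== LEMMAS AND PROOFS =====

-- A's running-best step, abstracted over the (count, masked) pair of one offset
def pvStep (st : Int × List String) (q : Int × String) : Int × List String :=
  if q.1 > st.1 then (q.1, [q.2])
  else if q.1 == st.1 then (st.1, st.2 ++ [q.2])
  else st

-- running max of the counts
def pvGMax (ps : List (Int × String)) (b : Int) : Int := ps.foldl (fun m q => max m q.1) b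

-- B's (count, masked) pair at offset i
def pvPairAt (longS shortS : List Char) (i : Nat) : Int × String :=
  let zs := ((longS.drop i).take shortS.length).zip shortS
  (((zs.filter (fun q => q.1 == q.2)).length : Int),
   String.ofList (zs.map (fun q => if q.1 == q.2 then q.1 else '*')))

lemma pvGMax_ge (ps : List (Int × String)) (b : Int) : b ≤ pvGMax ps b :=
  (PySem.List.le_foldl_max_int ps Prod.fst b).1

-- A's online argmax fold = (max of counts, strings of the maximal pairs)
lemma argmax_fold (ps : List (Int × String)) : ∀ (b : Int) (l : List String),
    ps.foldl pvStep (b, l) =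
      (pvGMax ps b,
       (if pvGMax ps b = b then l else []) ++ (ps.filter (fun q => q.1 == pvGMax ps b)).map Prod.snd) := by
  induction ps with
  | nil => intro b l; simp [pvGMax]
  | cons p ps ih =>
    intro b l
    have hg : pvGMax (p :: ps) b = pvGMax ps (max b p.1) := rfl
    rcases lt_trichotomy b p.1 with h1 | h1 | h1
    · -- p.1 > b : reset
      have hs : pvStep (b, l) p = (p.1, [p.2]) := by simp [pvStep, h1]
      have hm : max b p.1 = p.1 := by omega
      have hge : p.1 ≤ pvGMax ps p.1 := pvGMax_ge ps p.1
      have hnb : pvGMax ps p.1 ≠ b := by omega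
      have hnb' : p.1 ≠ b := by omega
      rw [List.foldl_cons, hs, ih, hg, hm]
      simp only [List.filter_cons, beq_iff_eq]
      by_cases he : pvGMax ps p.1 = p.1
      · simp [he, hnb']
      · have he' : p.1 ≠ pvGMax ps p.1 := fun h => he h.symm
        simp [he, he', hnb]
    · -- p.1 == b : append
      have hs : pvStep (b, l) p = (b, l ++ [p.2]) := by simp [pvStep, h1]
      have hm : max b p.1 = b := by omega
      rw [List.foldl_cons, hs, ih, hg, hm]
      simp only [List.filter_cons, beq_iff_eq]
      by_cases he : pvGMax ps b = b
      · have hc : p.1 = pvGMax ps b := by omega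
        simp [he, hc]
      · have hc : p.1 ≠ pvGMax ps b := by omega
        simp [he, hc]
    · -- p.1 < b : skip
      have hs : pvStep (b, l) p = (b, l) := by
        have h2 : ¬ (p.1 > b) := by omega
        have h3 : (p.1 == b) = false := by simp; omega
        simp [pvStep, h2, h3]
      have hm : max b p.1 = b := by omega
      have hge : b ≤ pvGMax ps b := pvGMax_ge ps b
      have hq : p.1 ≠ pvGMax ps b := by omega
      rw [List.foldl_cons, hs, ih, hg, hm]
      simp only [List.filter_cons, beq_iff_eq]
      simp [hq]

-- A's inner masking/counting loop over indices equals B's zip form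
lemma inner_eq (S : List Char) : ∀ (L : List Char) (i : Nat) (c0 : List Char) (n0 : Int),
    i + S.length ≤ L.length →
    (List.range S.length).foldl
      (fun (acc : List Char × Int) j =>
        if S.getD j ' ' == L.getD (i + j) ' ' then (acc.1 ++ [L.getD (i + j) ' '], acc.2 + 1)
        else (acc.1 ++ ['*'], acc.2))
      (c0, n0)
    = (c0 ++ (((L.drop i).take S.length).zip S).map (fun q => if q.1 == q.2 then q.1 else '*'),
       n0 + ((((L.drop i).take S.length).zip S).filter (fun q => q.1 == q.2)).length) := by
  induction S with
  | nil => intro L i c0 n0 h; simp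
  | cons s S ih =>
    intro L i c0 n0 h
    have hi : i < L.length := by simp at h; omega
    have hdrop : L.drop i = L[i] :: L.drop (i+1) := List.drop_eq_getElem_cons hi
    have hgetD : L.getD i ' ' = L[i] := List.getD_eq_getElem L ' ' hi
    have h' : (i+1) + S.length ≤ L.length := by simp at h; omega
    have hcong : ∀ (init : List Char × Int),
        (List.range S.length).foldl (fun (acc : List Char × Int) j =>
          if S.getD j ' ' == L.getD (i + (j+1)) ' ' then (acc.1 ++ [L.getD (i + (j+1)) ' '], acc.2 + 1)
          else (acc.1 ++ ['*'], acc.2)) init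
      = (List.range S.length).foldl (fun (acc : List Char × Int) j =>
          if S.getD j ' ' == L.getD ((i+1) + j) ' ' then (acc.1 ++ [L.getD ((i+1) + j) ' '], acc.2 + 1)
          else (acc.1 ++ ['*'], acc.2)) init := by
      intro init
      refine PySem.List.foldl_congr_mem _ _ _ init ?_
      intro acc j hj
      have hji : i + (j+1) = (i+1) + j := by omega
      simp [hji]
    simp only [List.length_cons]
    rw [List.range_succ_eq_map, List.foldl_cons, List.foldl_map]
    simp only [List.getD_cons_zero, Nat.add_zero, hgetD, hdrop, List.take_succ_cons,
      List.zip_cons_cons, List.map_cons, List.filter_cons]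
    by_cases hc : s = L[i]
    · have hb1 : (s == L[i]) = true := by simp [hc]
      have hb2 : (L[i] == s) = true := by simp [hc]
      simp only [hb1, if_true, hb2]
      simp only [Nat.succ_eq_add_one, List.getD_cons_succ]
      rw [hcong, ih L (i+1) (c0 ++ [L[i]]) (n0 + 1) h']
      simp [List.append_assoc]
      omega
    · have hb1 : (s == L[i]) = false := by simp [hc]
      have hb2 : (L[i] == s) = false := by simp; exact fun hx => hc hx.symm
      simp only [hb1, if_false, hb2, Bool.false_eq_true]
      simp only [Nat.succ_eq_add_one, List.getD_cons_succ]
      rw [hcong, ih L (i+1) (c0 ++ ['*']) n0 h']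
      simp [List.append_assoc]

-- python max of a nonempty list of nonnegative counts = running max from 0
lemma max_match_eq (ps : List (Int × String)) (hne : ps ≠ [])
    (hpos : ∀ q ∈ ps, 0 ≤ q.1) :
    (match ps.map Prod.fst with
     | [] => (0 : Int)
     | x :: t => t.foldl max x) = pvGMax ps 0 := by
  cases ps with
  | nil => exact absurd rfl hne
  | cons q rest =>
    have h0 : (0 : Int) ≤ q.1 := hpos q (List.mem_cons_self)
    have hm : max 0 q.1 = q.1 := by omega
    simp only [List.map_cons]
    show (rest.map Prod.fst).foldl max q.1 = pvGMax (q :: rest) 0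
    rw [List.foldl_map]
    show rest.foldl (fun m p => max m p.1) q.1 = pvGMax rest (max 0 q.1)
    rw [hm]
    rfl

-- the core equality, over the already-chosen long/short char lists
lemma core_eq (L S : List Char) (hLS : S.length ≤ L.length) :
    (List.range (L.length - S.length + 1)).foldl
      (fun st i =>
        let inner := (List.range S.length).foldl
          (fun (acc : List Char × Int) j =>
            let lB := L.getD (i + j) ' '
            let sB := S.getD j ' '
            if sB == lB then (acc.1 ++ [lB], acc.2 + 1) else (acc.1 ++ ['*'], acc.2))
          ([], 0)
        let currSeq := String.ofList inner.1
        let currMatch := inner.2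
        if currMatch > st.1 then (currMatch, [currSeq])
        else if currMatch == st.1 then (st.1, st.2 ++ [currSeq])
        else st)
      ((0 : Int), ([] : List String))
    = (let pairs := (List.range (L.length - S.length + 1)).map (pvPairAt L S)
       let best : Int := match pairs.map Prod.fst with
         | [] => 0
         | x :: t => t.foldl max x
       (best, (pairs.filter (fun q => q.1 == best)).map Prod.snd)) := by
  have hbody : ∀ (st : Int × List String) (i : Nat), i ∈ List.range (L.length - S.length + 1) →
      (let inner := (List.range S.length).foldl
          (fun (acc : List Char × Int) j =>
            let lB := L.getD (i + j) ' '
            let sB := S.getD j ' '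
            if sB == lB then (acc.1 ++ [lB], acc.2 + 1) else (acc.1 ++ ['*'], acc.2))
          ([], 0)
        let currSeq := String.ofList inner.1
        let currMatch := inner.2
        if currMatch > st.1 then (currMatch, [currSeq])
        else if currMatch == st.1 then (st.1, st.2 ++ [currSeq])
        else st)
      = pvStep st (pvPairAt L S i) := by
    intro st i hmem
    have hrange : i + S.length ≤ L.length := by
      simp [List.mem_range] at hmem; omega
    have := inner_eq S L i [] 0 hrange
    simp only [this, pvPairAt, pvStep]
    simp
  rw [PySem.List.foldl_congr_mem _ _ _ _ hbody, ← List.foldl_map (f := pvPairAt L S) (g := pvStep)]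
  have hne : (List.range (L.length - S.length + 1)).map (pvPairAt L S) ≠ [] := by
    simp [List.range_succ]
  have hpos : ∀ q ∈ (List.range (L.length - S.length + 1)).map (pvPairAt L S), 0 ≤ q.1 := by
    intro q hq
    rcases List.mem_map.mp hq with ⟨i, _, rfl⟩
    simp [pvPairAt]
  rw [argmax_fold]
  simp only [max_match_eq _ hne hpos]
  simp

-- ===== VERDICT (by name: the statement is the Claim_ definition above) =====
theorem SeqMatch_spec : Claim_equal_SeqMatch := by
  intro seq1 seq2 _
  show SeqMatch seq1 seq2 = SeqMatch_alt seq1 seq2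
  unfold SeqMatch SeqMatch_alt
  by_cases hlen : seq1.toList.length > seq2.toList.length
  · simp only [hlen, if_true]
    exact core_eq seq1.toList seq2.toList (by omega)
  · simp only [hlen, if_false]
    exact core_eq seq2.toList seq1.toList (by omega)
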